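-- pv_equiv track=rewrite | github.com/roblass/advent_of_code | 2023/12/one.py | filter_invalid_spring_groups
-- ===== SOURCE A (Python) =====
-- def filter_invalid_spring_groups(possibilities, springs_desc):
--     good_ones = []
--     for p in possibilities:
--         counts = []
--         count = 0
--
--         for char in p:
--             if char == '#':
--                 count += 1
--             elif count > 0:
--                 counts.append(count)
--                 count = 0
--
--         # Handle case where string ends with '#'
--         if count > 0:
--             counts.append(count)
--
--         if springs_desc == counts:
--             good_ones.append(p)
--     return good_ones
-- ===== SOURCE B (Python) =====
-- def filter_invalid_spring_groups(possibilities, springs_desc):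
--     return [
--         p
--         for p in possibilities
--         if springs_desc
--         == [len(w) for w in ''.join(c if c == '#' else ' ' for c in p).split()]
--     ]
-- ===== Notes on version B (the rewrite author's own statement) =====
-- stated objective: idiomatic
-- what changed: A's per-character accumulator state machine (running '#' counter flushed on separators plus a trailing flush) is replaced by staged passes: mask every non-'#' char to a space, let str.split() extract the maximal '#' runs, and compare their lengths in a filtering comprehension.
import Mathlib
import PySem

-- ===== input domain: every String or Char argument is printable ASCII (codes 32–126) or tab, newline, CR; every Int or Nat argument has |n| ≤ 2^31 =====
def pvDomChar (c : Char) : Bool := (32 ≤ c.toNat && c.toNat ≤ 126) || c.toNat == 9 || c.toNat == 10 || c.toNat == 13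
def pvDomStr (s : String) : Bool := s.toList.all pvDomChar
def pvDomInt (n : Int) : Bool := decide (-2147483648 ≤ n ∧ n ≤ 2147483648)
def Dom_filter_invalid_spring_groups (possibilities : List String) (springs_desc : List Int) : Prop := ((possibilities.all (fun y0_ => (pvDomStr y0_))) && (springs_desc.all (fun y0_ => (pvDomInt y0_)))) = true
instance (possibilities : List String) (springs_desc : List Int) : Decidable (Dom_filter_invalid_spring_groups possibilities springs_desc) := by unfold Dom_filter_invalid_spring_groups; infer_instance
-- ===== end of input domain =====

-- B replaces A's per-character accumulator state machine by staged passes: mask every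
-- non-'#' char to a space, split on whitespace, compare run lengths (objective: idiomatic).

-- ===== PORT A =====
-- inner loop of A: running '#' counter, flushed on each non-'#' char
def pvStepA (st : List Int × Int) (c : Char) : List Int × Int :=
  if c = '#' then (st.1, st.2 + 1)
  else if st.2 > 0 then (st.1 ++ [st.2], 0)
  else st

-- counts for one string p, including the trailing flush
def pvCountsA (p : String) : List Int :=
  let st := p.toList.foldl pvStepA ([], 0)
  if st.2 > 0 then st.1 ++ [st.2] else st.1

def filter_invalid_spring_groups (possibilities : List String) (springs_desc : List Int) : List String :=
  possibilities.foldl (fun good p => if springs_desc = pvCountsA p then good ++ [p] else good) []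

-- ===== PORT B =====
-- ''.join(c if c == '#' else ' ' for c in p): mask every non-'#' char to a space
def pvMask (cs : List Char) : List Char :=
  cs.map (fun c => if c = '#' then '#' else ' ')

-- [len(w) for w in masked.split()], via Python's str.split() (PySem.Chars.split₀)
def filter_invalid_spring_groups_alt (possibilities : List String) (springs_desc : List Int) : List String :=
  possibilities.filter (fun p =>
    springs_desc == (PySem.Chars.split₀ (pvMask p.toList)).map (fun w => (w.length : Int)))

-- ===== PRECONDITION & SPEC =====
def Spec_filter_invalid_spring_groups (possibilities : List String) (springs_desc : List Int) (out : List String) : Prop := out = filter_invalid_spring_groups_alt possibilities springs_desc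
instance (possibilities : List String) (springs_desc : List Int) (out : List String) : Decidable (Spec_filter_invalid_spring_groups possibilities springs_desc out) := by unfold Spec_filter_invalid_spring_groups; infer_instance

-- ===== CLAIM (what is proved, stated in full; the proofs are below) =====
def Claim_equal_filter_invalid_spring_groups : Prop := ∀ (possibilities : List String) (springs_desc : List Int), Dom_filter_invalid_spring_groups possibilities springs_desc → Spec_filter_invalid_spring_groups possibilities springs_desc (filter_invalid_spring_groups possibilities springs_desc)

-- ===== LEMMAS AND PROOFS =====

-- abstract view of A's state machine: runs of cs with a pending run of length `count`
def pvRunsFrom : Int → List Char → List Int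
  | count, [] => if count > 0 then [count] else []
  | count, c :: cs =>
    if c = '#' then pvRunsFrom (count + 1) cs
    else if count > 0 then count :: pvRunsFrom 0 cs
    else pvRunsFrom 0 cs

theorem pvFoldA_eq_runsFrom (cs : List Char) : ∀ (counts : List Int) (count : Int), 0 ≤ count →
    (let st := cs.foldl pvStepA (counts, count)
     if st.2 > 0 then st.1 ++ [st.2] else st.1) = counts ++ pvRunsFrom count cs := by
  induction cs with
  | nil =>
    intro counts count h
    simp only [List.foldl_nil, pvRunsFrom]
    split_ifs <;> simp
  | cons c cs ih =>
    intro counts count h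
    simp only [List.foldl_cons, pvStepA, pvRunsFrom]
    by_cases hc : c = '#'
    · simp only [hc, if_true]
      exact ih counts (count + 1) (by omega)
    · simp only [if_neg hc]
      by_cases hp : count > 0
      · simp only [if_pos hp]
        rw [ih (counts ++ [count]) 0 le_rfl]
        simp
      · have h0 : count = 0 := by omega
        simp only [h0]
        exact ih counts 0 le_rfl

-- str.split() of the masked string: its word lengths are exactly A's runs
theorem pvSplitGo_mask (cs : List Char) : ∀ (cur : List Char) (acc : List (List Char)),
    (PySem.Chars.split₀.go (pvMask cs) cur acc).map (fun w => (w.length : Int))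
      = acc.reverse.map (fun w => (w.length : Int)) ++ pvRunsFrom (cur.length : Int) cs := by
  induction cs with
  | nil =>
    intro cur acc
    simp only [pvMask, List.map_nil, PySem.Chars.split₀.go, pvRunsFrom]
    by_cases h : cur = []
    · simp [h]
    · have hl : (0 : Int) < cur.length := by exact_mod_cast List.length_pos_iff.mpr h
      rw [if_neg (by simpa using h), if_pos hl]
      simp
  | cons c cs ih =>
    intro cur acc
    simp only [pvMask, List.map_cons]
    by_cases hc : c = '#'
    · subst hc
      rw [if_pos rfl, PySem.Chars.split₀.go,
          show PySem.Chars.isspace '#' = false from by decide]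
      simp only [Bool.false_eq_true, if_false]
      rw [show (List.map (fun c => if c = '#' then '#' else ' ') cs) = pvMask cs from rfl,
          ih ('#' :: cur) acc]
      simp only [pvRunsFrom, List.length_cons]
      push_cast
      ring_nf
    · rw [if_neg hc, PySem.Chars.split₀.go,
          show PySem.Chars.isspace ' ' = true from by decide]
      simp only [if_true]
      by_cases h : cur = []
      · rw [h]
        simp only [List.isEmpty_nil, if_true]
        rw [show (List.map (fun c => if c = '#' then '#' else ' ') cs) = pvMask cs from rfl,
            ih [] acc]
        simp [pvRunsFrom, hc]
      · have hl : (0 : Int) < cur.length := by exact_mod_cast List.length_pos_iff.mpr h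
        rw [if_neg (by simpa using h),
            show (List.map (fun c => if c = '#' then '#' else ' ') cs) = pvMask cs from rfl,
            ih [] (cur.reverse :: acc)]
        simp only [pvRunsFrom]
        rw [if_neg hc, if_pos hl]
        simp

theorem pvCountsA_eq_split (p : String) :
    pvCountsA p = (PySem.Chars.split₀ (pvMask p.toList)).map (fun w => (w.length : Int)) := by
  unfold pvCountsA PySem.Chars.split₀
  rw [pvFoldA_eq_runsFrom p.toList [] 0 le_rfl, pvSplitGo_mask p.toList [] []]
  simp

theorem filter_invalid_spring_groups_spec_aux (possibilities : List String) (springs_desc : List Int)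
    (acc : List String) :
    possibilities.foldl (fun good p => if springs_desc = pvCountsA p then good ++ [p] else good) acc
      = acc ++ possibilities.filter (fun p =>
          springs_desc == (PySem.Chars.split₀ (pvMask p.toList)).map (fun w => (w.length : Int))) := by
  induction possibilities generalizing acc with
  | nil => simp
  | cons p ps ih =>
    simp only [List.foldl_cons, List.filter_cons]
    rw [ih]
    by_cases h : springs_desc = (PySem.Chars.split₀ (pvMask p.toList)).map (fun w => (w.length : Int))
    · rw [if_pos (by rw [pvCountsA_eq_split]; exact h)]
      simp [h]
    · rw [if_neg (by rw [pvCountsA_eq_split]; exact h)]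
      simp [h]

-- ===== VERDICT (by name: the statement is the Claim_ definition above) =====
theorem filter_invalid_spring_groups_spec : Claim_equal_filter_invalid_spring_groups := by
  intro possibilities springs_desc _
  unfold Spec_filter_invalid_spring_groups filter_invalid_spring_groups filter_invalid_spring_groups_alt
  rw [filter_invalid_spring_groups_spec_aux]
  simp
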